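-- pv_equiv track=rewrite | github.com/Donkey0322/ComeBuy | backend/processor/item.py | check_contain
-- ===== SOURCE A (Python) =====
-- def check_contain(d):
--     count = 0
--     keys = ['ices', 'sweets', 'tastes', 'toppings']
--     for key in dict(d).keys():
--         if(key in keys):
--             if(dict(d)[key]):
--                 count += 1
--             else:
--                 keys.remove(key)
--     return count, keys
-- ===== SOURCE B (Python) =====
-- def check_contain(d):
--     dd = dict(d)
--     known = ['ices', 'sweets', 'tastes', 'toppings']
--     count = sum(1 for k in known if k in dd and dd[k])
--     keys = [k for k in known if not (k in dd and not dd[k])]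
--     return count, keys
-- ===== Notes on version B (the rewrite author's own statement) =====
-- stated objective: simpler
-- what changed: B builds the dict once and probes the four known keys against it with one sum and one comprehension over the fixed list, instead of A's mutating loop over every input key with a list-membership test and list.remove.
import Mathlib
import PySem

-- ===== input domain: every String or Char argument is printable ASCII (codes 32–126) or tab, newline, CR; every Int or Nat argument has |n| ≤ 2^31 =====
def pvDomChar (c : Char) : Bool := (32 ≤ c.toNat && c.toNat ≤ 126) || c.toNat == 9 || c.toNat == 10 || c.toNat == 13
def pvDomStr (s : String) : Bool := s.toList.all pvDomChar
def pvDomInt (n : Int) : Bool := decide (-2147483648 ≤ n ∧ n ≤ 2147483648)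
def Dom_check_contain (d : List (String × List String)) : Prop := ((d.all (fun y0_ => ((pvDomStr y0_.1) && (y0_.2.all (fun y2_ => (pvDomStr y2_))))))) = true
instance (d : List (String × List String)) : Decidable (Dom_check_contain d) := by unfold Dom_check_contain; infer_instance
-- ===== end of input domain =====

-- B probes the four known keys against the dict built once (one countP, one filter over the
-- fixed list) instead of A's mutating scan over every input key; simpler, same return value.

-- ===== PORT A =====
-- dict(d)[key] and keys.remove(key) are only reached with key ∈ dd.keys resp. key ∈ st.2,
-- where getD's default is unreachable and List.erase is exactly Python's list.remove.
def check_contain (d : List (String × List String)) : Int × List String :=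
  let dd := PySem.Dict.ofList d
  (dd.keys).foldl
    (fun (st : Int × List String) key =>
      if key ∈ st.2 then
        if !(dd.getD key []).isEmpty then (st.1 + 1, st.2)
        else (st.1, st.2.erase key)
      else st)
    (0, ["ices", "sweets", "tastes", "toppings"])

-- ===== PORT B =====
def check_contain_alt (d : List (String × List String)) : Int × List String :=
  let dd := PySem.Dict.ofList d
  let known := ["ices", "sweets", "tastes", "toppings"]
  ((known.countP (fun k => dd.contains k && !(dd.getD k []).isEmpty) : Int),
   known.filter (fun k => !(dd.contains k && (dd.getD k []).isEmpty)))

-- ===== PRECONDITION & SPEC =====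
def Spec_check_contain (d : List (String × List String)) (out : Int × List String) : Prop := out = check_contain_alt d
instance (d : List (String × List String)) (out : Int × List String) : Decidable (Spec_check_contain d out) := by unfold Spec_check_contain; infer_instance

-- ===== CLAIM (what is proved, stated in full; the proofs are below) =====
def Claim_equal_check_contain : Prop := ∀ (d : List (String × List String)), Dom_check_contain d → Spec_check_contain d (check_contain d)

-- ===== LEMMAS AND PROOFS =====

-- Invariant of A's loop: folding over a duplicate-free key list K from (c, ks) adds to c the
-- number of keys of K that are in ks with a truthy value, and filters out of ks the keys of K
-- with a falsy value.
theorem check_contain_loop (dd : PySem.Dict String (List String)) :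
    ∀ (K : List String) (c : Int) (ks : List String), K.Nodup → ks.Nodup →
      K.foldl
        (fun (st : Int × List String) key =>
          if key ∈ st.2 then
            if !(dd.getD key []).isEmpty then (st.1 + 1, st.2)
            else (st.1, st.2.erase key)
          else st)
        (c, ks)
      = (c + (K.countP (fun k => decide (k ∈ ks) && !(dd.getD k []).isEmpty) : Int),
         ks.filter (fun k => !(decide (k ∈ K) && (dd.getD k []).isEmpty))) := by
  intro K
  induction K with
  | nil =>
    intro c ks _ _
    simp
  | cons k K' ih =>
    intro c ks hK hks
    have hkK' : k ∉ K' := (List.nodup_cons.mp hK).1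
    have hK' : K'.Nodup := (List.nodup_cons.mp hK).2
    simp only [List.foldl_cons]
    by_cases hmem : k ∈ ks
    · by_cases hT : (dd.getD k []).isEmpty
      · -- falsy value: k removed from ks
        rw [if_pos hmem, hT]
        simp only [Bool.not_true, Bool.false_eq_true, if_false]
        rw [ih c (ks.erase k) hK' (hks.erase k), Prod.mk.injEq]
        constructor
        · -- counts agree
          rw [List.countP_cons_of_neg (by simp [hmem, hT])]
          congr 2
          apply List.countP_congr
          intro x hx
          have hxk : x ≠ k := fun h => hkK' (h ▸ hx)
          simp [List.mem_erase_of_ne hxk]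
        · -- filtered lists agree
          rw [hks.erase_eq_filter, List.filter_filter]
          apply List.filter_congr
          intro x hx
          by_cases hxk : x = k
          · subst hxk; simp [hT]
          · simp [hxk, List.mem_cons]
      · -- truthy value: count incremented
        rw [if_pos hmem, eq_false_of_ne_true hT]
        simp only [Bool.not_false, if_true]
        rw [ih (c + 1) ks hK' hks, Prod.mk.injEq]
        constructor
        · rw [List.countP_cons_of_pos (by simp [hmem, hT])]
          push_cast
          ring
        · apply List.filter_congr
          intro x hx
          by_cases hxk : x = k
          · subst hxk; simp [hT]
          · simp [hxk, List.mem_cons]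
    · -- key not (any longer) in ks: state unchanged
      rw [if_neg hmem]
      rw [ih c ks hK' hks, Prod.mk.injEq]
      constructor
      · rw [List.countP_cons_of_neg (by simp [hmem])]
      · apply List.filter_congr
        intro x hx
        have hxk : x ≠ k := fun h => hmem (h ▸ hx)
        simp [hxk, List.mem_cons]

-- Both count-filters are duplicate-free lists with the same membership, hence the same length.
theorem count_swap (dd : PySem.Dict String (List String)) (known : List String)
    (hknown : known.Nodup) (hkeys : dd.keys.Nodup) :
    (dd.keys).countP (fun k => decide (k ∈ known) && !(dd.getD k []).isEmpty)
      = known.countP (fun k => decide (k ∈ dd.keys) && !(dd.getD k []).isEmpty) := by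
  rw [List.countP_eq_length_filter, List.countP_eq_length_filter]
  apply List.Perm.length_eq
  rw [List.perm_ext_iff_of_nodup (hkeys.filter _) (hknown.filter _)]
  intro a
  simp only [List.mem_filter, Bool.and_eq_true, decide_eq_true_eq]
  tauto

theorem check_contain_eq (d : List (String × List String)) :
    check_contain d = check_contain_alt d := by
  unfold check_contain check_contain_alt
  dsimp only
  rw [check_contain_loop (PySem.Dict.ofList d) (PySem.Dict.ofList d).keys 0
        ["ices", "sweets", "tastes", "toppings"]
        (PySem.Dict.nodup_keys_ofList d) (by decide), Prod.mk.injEq]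
  constructor
  · rw [zero_add]
    norm_cast
    rw [count_swap (PySem.Dict.ofList d) _ (by decide) (PySem.Dict.nodup_keys_ofList d)]
    apply List.countP_congr
    intro x _
    rw [PySem.Dict.contains_eq_decide_mem_keys]
  · apply List.filter_congr
    intro x _
    rw [PySem.Dict.contains_eq_decide_mem_keys]

-- ===== VERDICT (by name: the statement is the Claim_ definition above) =====
theorem check_contain_spec : Claim_equal_check_contain := by
  intro d _
  exact check_contain_eq d
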